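-- pv_equiv track=rewrite | github.com/Nemo-YitongChen/ibkr_quant_system | src/tools/review_weekly_output_support.py | build_weekly_latest_run_positions
-- ===== SOURCE A (Python) =====
-- from typing import Any, Dict, List
--
-- def _portfolio_key(row: Dict[str, Any]) -> str:
--     portfolio_id = str(row.get("portfolio_id") or "").strip()
--     return portfolio_id or f"LEGACY:{row.get('market', '')}"
--
-- def build_weekly_latest_run_positions(
--     run_rows: List[Dict[str, Any]],
--     position_rows: List[Dict[str, Any]],
-- ) -> Dict[str, List[Dict[str, Any]]]:
--     latest_run_id_by_portfolio: Dict[str, str] = {}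
--     latest_rows_by_portfolio: Dict[str, List[Dict[str, Any]]] = {}
--     for row in run_rows:
--         portfolio_id = _portfolio_key(row)
--         latest_run_id_by_portfolio[portfolio_id] = str(row.get("run_id") or "")
--         latest_rows_by_portfolio.setdefault(portfolio_id, [])
--     rows_by_run: Dict[str, List[Dict[str, Any]]] = {}
--     for row in position_rows:
--         run_id = str(row.get("run_id") or "")
--         rows_by_run.setdefault(run_id, []).append(dict(row))
--     for portfolio_id, run_id in latest_run_id_by_portfolio.items():
--         latest_rows_by_portfolio[portfolio_id] = list(rows_by_run.get(run_id, []))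
--     return latest_rows_by_portfolio
-- ===== SOURCE B (Python) =====
-- from typing import Any, Dict, List
--
-- def _portfolio_key(row: Dict[str, Any]) -> str:
--     portfolio_id = str(row.get("portfolio_id") or "").strip()
--     return portfolio_id or f"LEGACY:{row.get('market', '')}"
--
-- def build_weekly_latest_run_positions(
--     run_rows: List[Dict[str, Any]],
--     position_rows: List[Dict[str, Any]],
-- ) -> Dict[str, List[Dict[str, Any]]]:
--     latest: Dict[str, str] = {}
--     for row in run_rows:
--         latest[_portfolio_key(row)] = str(row.get("run_id") or "")
--     result: Dict[str, List[Dict[str, Any]]] = {}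
--     for pid in latest:
--         result[pid] = []
--     portfolios_by_run: Dict[str, List[str]] = {}
--     for pid, rid in latest.items():
--         portfolios_by_run.setdefault(rid, []).append(pid)
--     for row in position_rows:
--         pids = portfolios_by_run.get(str(row.get("run_id") or ""))
--         if pids:
--             copy = dict(row)
--             for pid in pids:
--                 result[pid].append(copy)
--     return result
-- ===== Notes on version B (the rewrite author's own statement) =====
-- stated objective: alternative
-- what changed: Instead of grouping ALL positions by run_id and then reassigning each portfolio its group in a final pass, B inverts the latest-run map (run_id -> portfolios) and makes one pass over position_rows, appending one shared copy of each relevant row directly to every portfolio whose latest run matches; the intermediate rows_by_run table and the reassignment pass disappear.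
import Mathlib
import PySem

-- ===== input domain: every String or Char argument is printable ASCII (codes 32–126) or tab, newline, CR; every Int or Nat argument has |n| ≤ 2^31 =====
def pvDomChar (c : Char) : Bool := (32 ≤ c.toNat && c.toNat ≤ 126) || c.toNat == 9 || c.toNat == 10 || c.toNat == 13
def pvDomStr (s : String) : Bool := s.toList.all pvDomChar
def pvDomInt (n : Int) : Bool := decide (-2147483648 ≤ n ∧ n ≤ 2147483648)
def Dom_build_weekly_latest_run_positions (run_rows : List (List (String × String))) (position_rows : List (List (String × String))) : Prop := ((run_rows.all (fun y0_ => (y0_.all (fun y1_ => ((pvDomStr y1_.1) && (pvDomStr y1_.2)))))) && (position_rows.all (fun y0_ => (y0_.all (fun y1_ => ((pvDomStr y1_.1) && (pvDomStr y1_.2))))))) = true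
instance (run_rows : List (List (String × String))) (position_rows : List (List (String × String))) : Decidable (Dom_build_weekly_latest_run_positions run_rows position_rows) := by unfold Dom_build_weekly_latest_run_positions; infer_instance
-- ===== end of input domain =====

-- B groups the positions in ONE pass via an inverted latest-run map (run_id -> portfolios), dropping A's
-- full rows_by_run table and its final reassignment pass; objective: alternative decomposition, same cost.

-- ===== PORT A =====
-- row.get(k) or "" (None and "" both become ""): exact as getD with default ""
def pvGet (row : List (String × String)) (k : String) : String :=
  (PySem.Dict.mk row).getD k ""

-- _portfolio_key: strip(str(row.get("portfolio_id") or "")) or f"LEGACY:{row.get('market','')}"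
def pvKey (row : List (String × String)) : String :=
  let pid := PySem.Str.strip (pvGet row "portfolio_id")
  if pid = "" then "LEGACY:" ++ pvGet row "market" else pid

-- str(row.get("run_id") or "")
def pvRid (row : List (String × String)) : String := pvGet row "run_id"

def build_weekly_latest_run_positions (run_rows : List (List (String × String))) (position_rows : List (List (String × String))) : List (String × List (List (String × String))) :=
  -- first loop: latest_run_id_by_portfolio (insert) and latest_rows_by_portfolio (setdefault)
  let st := run_rows.foldl
    (fun (st : PySem.Dict String String × PySem.Dict String (List (List (String × String)))) row =>
      (st.1.insert (pvKey row) (pvRid row), st.2.setdefault (pvKey row) []))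
    (PySem.Dict.empty, PySem.Dict.empty)
  -- second loop: rows_by_run.setdefault(run_id, []).append(dict(row))  (dict(row) = the row value itself)
  let rows_by_run : PySem.Dict String (List (List (String × String))) :=
    position_rows.foldl (fun d row => d.modify (pvRid row) [] (· ++ [row])) PySem.Dict.empty
  -- third loop: latest_rows_by_portfolio[pid] = list(rows_by_run.get(run_id, []))
  let final := st.1.items.foldl (fun d pr => d.insert pr.1 (rows_by_run.getD pr.2 [])) st.2
  final.items

-- ===== PORT B =====
def build_weekly_latest_run_positions_alt (run_rows : List (List (String × String))) (position_rows : List (List (String × String))) : List (String × List (List (String × String))) :=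
  -- latest[_portfolio_key(row)] = run_id  (last wins)
  let latest := run_rows.foldl (fun d row => d.insert (pvKey row) (pvRid row))
    (PySem.Dict.empty : PySem.Dict String String)
  -- result[pid] = [] for pid in latest
  let result0 := latest.keys.foldl
    (fun d pid => d.insert pid ([] : List (List (String × String)))) PySem.Dict.empty
  -- portfolios_by_run.setdefault(rid, []).append(pid)
  let pbr : PySem.Dict String (List String) :=
    latest.items.foldl (fun d pr => d.modify pr.2 [] (· ++ [pr.1])) PySem.Dict.empty
  -- one pass over position_rows: append the row to every portfolio whose latest run matches
  let final := position_rows.foldl (fun res row =>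
      match pbr.get? (pvRid row) with
      | none => res
      | some pids =>
        if pids.isEmpty then res
        else pids.foldl (fun res pid => res.modify pid [] (· ++ [row])) res) result0
  final.items

-- ===== PRECONDITION & SPEC =====
def Spec_build_weekly_latest_run_positions (run_rows : List (List (String × String))) (position_rows : List (List (String × String))) (out : List (String × List (List (String × String)))) : Prop := out = build_weekly_latest_run_positions_alt run_rows position_rows
instance (run_rows : List (List (String × String))) (position_rows : List (List (String × String))) (out : List (String × List (List (String × String)))) : Decidable (Spec_build_weekly_latest_run_positions run_rows position_rows out) := by unfold Spec_build_weekly_latest_run_positions; infer_instance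

-- ===== CLAIM (what is proved, stated in full; the proofs are below) =====
def Claim_equal_build_weekly_latest_run_positions : Prop := ∀ (run_rows : List (List (String × String))) (position_rows : List (List (String × String))), Dom_build_weekly_latest_run_positions run_rows position_rows → Spec_build_weekly_latest_run_positions run_rows position_rows (build_weekly_latest_run_positions run_rows position_rows)

-- ===== LEMMAS AND PROOFS =====

-- the shared "latest" dict
def pvLatest (run_rows : List (List (String × String))) : PySem.Dict String String :=
  run_rows.foldl (fun d row => d.insert (pvKey row) (pvRid row)) PySem.Dict.empty

lemma pv_foldl_pair {α β γ : Type} (f : β → α → β) (g : γ → α → γ) (l : List α) (a : β) (b : γ) :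
    l.foldl (fun st x => (f st.1 x, g st.2 x)) (a, b) = (l.foldl f a, l.foldl g b) := by
  induction l generalizing a b with
  | nil => rfl
  | cons x xs ih => simp [List.foldl_cons, ih]

lemma pv_latest_keys_nodup (run_rows : List (List (String × String))) :
    (pvLatest run_rows).keys.Nodup := by
  unfold pvLatest
  exact PySem.Dict.nodup_keys_foldl_insert_key _ _ _ _ (by simp [PySem.Dict.keys_empty])

lemma pv_set_update_self {s : List String} {xs : List String}
    (h : ∀ x ∈ xs, x ∈ s) : PySem.Set.update s xs = s := by
  rw [PySem.Set.update_eq_append_filter]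
  have : List.filter (fun y => !PySem.Set.contains s y) (PySem.Set.ofList xs) = [] := by
    rw [List.filter_eq_nil_iff]
    intro y hy
    have hmem : y ∈ s := h y ((PySem.Set.mem_ofList xs y).1 hy)
    simp [PySem.Set.contains, hmem]
  rw [this, List.append_nil]

-- keys of the setdefault fold = keys of the insert fold over the same keys
lemma pv_keys_foldl_setdefault {ν : Type} (key : List (String × String) → String)
    (l : List (List (String × String))) (d : PySem.Dict String ν) (v : ν) :
    (l.foldl (fun d x => d.setdefault (key x) v) d).keys = PySem.Set.update d.keys (l.map key) := by
  induction l generalizing d with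
  | nil => simp [PySem.Set.update]
  | cons x xs ih =>
    simp only [List.foldl_cons, List.map_cons, ih, PySem.Set.update_cons]
    congr 1
    rw [PySem.Dict.keys_setdefault]
    by_cases h : d.contains (key x) = true
    · have : key x ∈ d.keys := (PySem.Dict.contains_iff_mem_keys d (key x)).1 h
      simp [h, PySem.Set.add, PySem.Set.contains, this]
    · have h' : d.contains (key x) = false := by simpa using h
      have : key x ∉ d.keys := fun hm => by
        simp [(PySem.Dict.contains_iff_mem_keys d (key x)).2 hm] at h'
      simp [h, PySem.Set.add, PySem.Set.contains, this]

-- getD after a fold of inserts with keyed values, key not hit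
lemma pv_getD_foldl_insert_not_mem {α ν : Type} (key : α → String) (F : α → ν)
    (l : List α) (d : PySem.Dict String ν) (k : String) (d0 : ν)
    (h : k ∉ l.map key) :
    (l.foldl (fun d x => d.insert (key x) (F x)) d).getD k d0 = d.getD k d0 := by
  induction l generalizing d with
  | nil => rfl
  | cons x xs ih =>
    simp only [List.map_cons, List.mem_cons, not_or] at h
    simp only [List.foldl_cons]
    rw [ih _ h.2, PySem.Dict.getD_insert]
    simp [h.1]

lemma pv_getD_foldl_insert_mem {α ν : Type} (key : α → String) (F : α → ν)
    (l : List α) (d : PySem.Dict String ν) (d0 : ν) (a : α)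
    (hnd : (l.map key).Nodup) (ha : a ∈ l) :
    (l.foldl (fun d x => d.insert (key x) (F x)) d).getD (key a) d0 = F a := by
  induction l generalizing d with
  | nil => cases ha
  | cons x xs ih =>
    simp only [List.map_cons, List.nodup_cons] at hnd
    simp only [List.foldl_cons]
    rcases List.mem_cons.1 ha with rfl | hmem
    · rw [pv_getD_foldl_insert_not_mem _ _ _ _ _ _ hnd.1]
      simp
    · exact ih _ hnd.2 hmem

-- grouping fold: getD of rows_by_run / portfolios_by_run
lemma pv_getD_group {α β : Type} (keyf : α → String) (valf : α → β) (l : List α) (r : String) :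
    (l.foldl (fun d x => d.modify (keyf x) [] (· ++ [valf x]))
      (PySem.Dict.empty : PySem.Dict String (List β))).getD r []
      = (l.filter (fun x => keyf x == r)).map valf := by
  have h := PySem.Dict.getD_foldl_modify_append (l.map (fun x => (keyf x, valf x)))
    (PySem.Dict.empty : PySem.Dict String (List β)) r
  rw [List.foldl_map] at h
  simpa [PySem.Dict.getD_empty, List.filter_map, Function.comp] using h

-- pointwise effect of the modify fold over a duplicate-free list of portfolios
lemma pv_getD_foldl_modify_mem {β : Type} (ps : List String) (row : β)
    (d : PySem.Dict String (List β)) (k : String) (hnd : ps.Nodup) :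
    (ps.foldl (fun d p => d.modify p [] (· ++ [row])) d).getD k []
      = if k ∈ ps then d.getD k [] ++ [row] else d.getD k [] := by
  induction ps generalizing d with
  | nil => simp
  | cons p rest ih =>
    simp only [List.nodup_cons] at hnd
    simp only [List.foldl_cons, ih _ hnd.2, PySem.Dict.getD_modify, List.mem_cons]
    by_cases hk : k = p
    · subst hk
      simp [hnd.1]
    · simp [hk]

-- keys after the modify fold stay put when every key modified is already present
lemma pv_keys_foldl_modify_sub {β : Type} (ps : List String) (row : β)
    (d : PySem.Dict String (List β)) (h : ∀ p ∈ ps, p ∈ d.keys) :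
    (ps.foldl (fun d p => d.modify p [] (· ++ [row])) d).keys = d.keys := by
  have hk := PySem.Dict.keys_foldl_modify_key ps (fun p => p) []
    (fun _ p (v : List β) => v ++ [row]) d
  exact hk.trans (pv_set_update_self (by simpa using h))

-- B's per-row step, written as a fold over getD
lemma pv_bstep_eq (pbr : PySem.Dict String (List String)) (row : List (String × String))
    (res : PySem.Dict String (List (List (String × String)))) :
    (match pbr.get? (pvRid row) with
     | none => res
     | some pids =>
       if pids.isEmpty then res
       else pids.foldl (fun res pid => res.modify pid [] (· ++ [row])) res)
    = (pbr.getD (pvRid row) []).foldl (fun res pid => res.modify pid [] (· ++ [row])) res := by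
  rw [PySem.Dict.getD_eq_get?_getD]
  cases h : pbr.get? (pvRid row) with
  | none => simp
  | some pids =>
    cases pids with
    | nil => simp
    | cons p ps => simp

-- membership in the inverted map's bucket
lemma pv_mem_pids (run_rows : List (List (String × String))) (k v r : String)
    (hkv : (k, v) ∈ (pvLatest run_rows).items) :
    (k ∈ (((pvLatest run_rows).items.filter (fun pr => pr.2 == r)).map (·.1)) ↔ v = r) := by
  constructor
  · intro hk
    rcases List.mem_map.1 hk with ⟨pr, hpr, hpr1⟩
    rcases List.mem_filter.1 hpr with ⟨hprm, hpr2⟩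
    have hkpr : (k, pr.2) ∈ (pvLatest run_rows).items := by
      rw [← hpr1]; simpa using hprm
    have h1 := PySem.Dict.get?_of_mem_items _ hkv (pv_latest_keys_nodup run_rows)
    have h2 := PySem.Dict.get?_of_mem_items _ hkpr (pv_latest_keys_nodup run_rows)
    rw [h1] at h2
    rw [Option.some.inj h2]
    simpa using hpr2
  · intro hv
    subst hv
    exact List.mem_map.2 ⟨(k, v), List.mem_filter.2 ⟨hkv, by simp⟩, rfl⟩

-- main invariant of B's single pass
lemma pv_b_fold (run_rows : List (List (String × String)))
    (l : List (List (String × String)))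
    (res : PySem.Dict String (List (List (String × String))))
    (hkeys : res.keys = (pvLatest run_rows).keys) :
    ((l.foldl (fun res row =>
        match ((pvLatest run_rows).items.foldl
            (fun d pr => d.modify pr.2 [] (· ++ [pr.1])) PySem.Dict.empty).get? (pvRid row) with
        | none => res
        | some pids =>
          if pids.isEmpty then res
          else pids.foldl (fun res pid => res.modify pid [] (· ++ [row])) res) res).keys
        = (pvLatest run_rows).keys)
    ∧ (∀ k v, (k, v) ∈ (pvLatest run_rows).items →
        (l.foldl (fun res row =>
          match ((pvLatest run_rows).items.foldl
              (fun d pr => d.modify pr.2 [] (· ++ [pr.1])) PySem.Dict.empty).get? (pvRid row) with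
          | none => res
          | some pids =>
            if pids.isEmpty then res
            else pids.foldl (fun res pid => res.modify pid [] (· ++ [row])) res) res).getD k []
          = res.getD k [] ++ l.filter (fun row => pvRid row == v)) := by
  induction l generalizing res with
  | nil => exact ⟨hkeys, by intro k v _; simp⟩
  | cons row rest ih =>
    have hpids : ((pvLatest run_rows).items.foldl
        (fun d pr => d.modify pr.2 [] (· ++ [pr.1])) PySem.Dict.empty).getD (pvRid row) []
        = (((pvLatest run_rows).items.filter (fun pr => pr.2 == pvRid row)).map (·.1)) := by
      have h := pv_getD_group (fun pr : String × String => pr.2) (fun pr => pr.1)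
        ((pvLatest run_rows).items) (pvRid row)
      simpa using h
    have hnodpids : (((pvLatest run_rows).items.filter (fun pr => pr.2 == pvRid row)).map (·.1)).Nodup := by
      have hsub : (((pvLatest run_rows).items.filter (fun pr => pr.2 == pvRid row)).map (·.1)).Sublist
          ((pvLatest run_rows).items.map (·.1)) :=
        ((pvLatest run_rows).items.filter_sublist).map _
      exact hsub.nodup (pv_latest_keys_nodup run_rows)
    have hsubkeys : ∀ p ∈ (((pvLatest run_rows).items.filter (fun pr => pr.2 == pvRid row)).map (·.1)),
        p ∈ res.keys := by
      intro p hp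
      rcases List.mem_map.1 hp with ⟨pr, hpr, hpr1⟩
      rw [hkeys]
      exact hpr1 ▸ List.mem_map.2 ⟨pr, (List.mem_filter.1 hpr).1, rfl⟩
    -- the stepped dict
    set res' := (((pvLatest run_rows).items.filter (fun pr => pr.2 == pvRid row)).map (·.1)).foldl
        (fun res pid => res.modify pid [] (· ++ [row])) res with hres'
    have hstep : (match ((pvLatest run_rows).items.foldl
          (fun d pr => d.modify pr.2 [] (· ++ [pr.1])) PySem.Dict.empty).get? (pvRid row) with
        | none => res
        | some pids =>
          if pids.isEmpty then res
          else pids.foldl (fun res pid => res.modify pid [] (· ++ [row])) res) = res' := by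
      rw [pv_bstep_eq, hpids]
    have hkeys' : res'.keys = (pvLatest run_rows).keys := by
      rw [hres', pv_keys_foldl_modify_sub _ _ _ hsubkeys, hkeys]
    obtain ⟨ihk, ihg⟩ := ih res' hkeys'
    constructor
    · simpa only [List.foldl_cons, hstep] using ihk
    · intro k v hkv
      have hres'getD : res'.getD k [] =
          res.getD k [] ++ if pvRid row == v then [row] else [] := by
        rw [hres', pv_getD_foldl_modify_mem _ _ _ _ hnodpids]
        by_cases hv : v = pvRid row
        · rw [if_pos ((pv_mem_pids run_rows k v (pvRid row) hkv).2 hv)]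
          simp [hv]
        · rw [if_neg (fun hm => hv ((pv_mem_pids run_rows k v (pvRid row) hkv).1 hm))]
          have : ¬ (pvRid row == v) = true := by
            simp only [beq_iff_eq]
            exact fun h => hv h.symm
          simp [this]
      simp only [List.foldl_cons, hstep, List.filter_cons]
      rw [ihg k v hkv, hres'getD]
      by_cases hc : (pvRid row == v) = true
      · simp [hc, List.append_assoc]
      · simp [hc]

-- getD of A's final dict at a latest key
lemma pv_a_getD (run_rows position_rows : List (List (String × String))) (k v : String)
    (hkv : (k, v) ∈ (pvLatest run_rows).items)
    (st2 : PySem.Dict String (List (List (String × String)))) :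
    ((pvLatest run_rows).items.foldl
        (fun d pr => d.insert pr.1 ((position_rows.foldl
            (fun d row => d.modify (pvRid row) [] (· ++ [row])) PySem.Dict.empty).getD pr.2 []))
        st2).getD k []
      = position_rows.filter (fun row => pvRid row == v) := by
  have h := pv_getD_foldl_insert_mem (fun pr : String × String => pr.1)
    (fun pr => (position_rows.foldl
        (fun d row => d.modify (pvRid row) [] (· ++ [row])) PySem.Dict.empty).getD pr.2 [])
    ((pvLatest run_rows).items) st2 [] (k, v) (pv_latest_keys_nodup run_rows) hkv
  rw [h]
  have hg := pv_getD_group pvRid (fun row => row) position_rows v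
  simpa using hg

-- ===== VERDICT (by name: the statement is the Claim_ definition above) =====
theorem build_weekly_latest_run_positions_spec : Claim_equal_build_weekly_latest_run_positions := by
  intro run_rows position_rows _
  unfold Spec_build_weekly_latest_run_positions
  simp only [build_weekly_latest_run_positions, build_weekly_latest_run_positions_alt]
  rw [pv_foldl_pair (fun d row => d.insert (pvKey row) (pvRid row))
    (fun d row => d.setdefault (pvKey row) []) run_rows PySem.Dict.empty PySem.Dict.empty]
  have hL : run_rows.foldl (fun d row => d.insert (pvKey row) (pvRid row))
      (PySem.Dict.empty : PySem.Dict String String) = pvLatest run_rows := rfl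
  simp only [hL]
  have hnd := pv_latest_keys_nodup run_rows
  -- keys of st2 (the setdefault fold) = latest keys
  have hst2keys : (run_rows.foldl (fun d row => d.setdefault (pvKey row) [])
      (PySem.Dict.empty : PySem.Dict String (List (List (String × String))))).keys
      = (pvLatest run_rows).keys := by
    rw [pv_keys_foldl_setdefault pvKey run_rows PySem.Dict.empty []]
    unfold pvLatest
    rw [PySem.Dict.keys_foldl_insert_key run_rows pvKey (fun _ row => pvRid row) PySem.Dict.empty]
    rfl
  -- keys of A's final dict
  have hAkeys : ((pvLatest run_rows).items.foldl
      (fun d pr => d.insert pr.1 ((position_rows.foldl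
          (fun d row => d.modify (pvRid row) [] (· ++ [row])) PySem.Dict.empty).getD pr.2 []))
      (run_rows.foldl (fun d row => d.setdefault (pvKey row) []) PySem.Dict.empty)).keys
      = (pvLatest run_rows).keys := by
    rw [PySem.Dict.keys_foldl_insert_key ((pvLatest run_rows).items) (fun pr => pr.1) _ _]
    rw [hst2keys]
    exact pv_set_update_self (by intro x hx; exact hx)
  -- keys and getD of result0
  have hR0keys : ((pvLatest run_rows).keys.foldl
      (fun d pid => d.insert pid ([] : List (List (String × String)))) PySem.Dict.empty).keys
      = (pvLatest run_rows).keys := by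
    rw [PySem.Dict.keys_foldl_insert ((pvLatest run_rows).keys) (fun _ _ => []) PySem.Dict.empty]
    simp only [PySem.Dict.keys_empty]
    rw [PySem.Set.update_nil_left, PySem.Set.ofList_eq_self_of_nodup _ hnd]
  have hR0getD : ∀ k ∈ (pvLatest run_rows).keys,
      ((pvLatest run_rows).keys.foldl
        (fun d pid => d.insert pid ([] : List (List (String × String)))) PySem.Dict.empty).getD k []
      = [] := by
    intro k hk
    have := pv_getD_foldl_insert_mem (fun p : String => p)
      (fun _ => ([] : List (List (String × String)))) ((pvLatest run_rows).keys)
      PySem.Dict.empty [] k (by simpa using hnd) hk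
    simpa using this
  -- B's fold invariant
  obtain ⟨hBkeys, hBgetD⟩ := pv_b_fold run_rows position_rows
    ((pvLatest run_rows).keys.foldl
      (fun d pid => d.insert pid ([] : List (List (String × String)))) PySem.Dict.empty) hR0keys
  -- A's final items = B's final items, via items_eq_map_keys at default []
  rw [PySem.Dict.items_eq_map_keys _ (by rw [hAkeys]; exact hnd) [], PySem.Dict.items_eq_map_keys _ (by rw [hBkeys]; exact hnd) []]
  rw [hAkeys, hBkeys]
  apply List.map_congr_left
  intro k hk
  rcases List.mem_map.1 (show k ∈ (pvLatest run_rows).items.map (·.1) from hk) with ⟨pr, hpr, hpr1⟩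
  obtain ⟨v, hkv⟩ : ∃ v, (k, v) ∈ (pvLatest run_rows).items :=
    ⟨pr.2, by rw [← hpr1]; simpa using hpr⟩
  have hA := pv_a_getD run_rows position_rows k v hkv
    (run_rows.foldl (fun d row => d.setdefault (pvKey row) []) PySem.Dict.empty)
  have hB := hBgetD k v hkv
  rw [hA, hB, hR0getD k hk]
  simp
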